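-- pv_equiv track=rewrite | github.com/liu19891203/tg-group-admin-bot | bot/handlers/admin.py | _menu_two_cols
-- ===== SOURCE A (Python) =====
-- def _menu_two_cols(items):
--     rows = []
--     row = []
--     for item in list(items or []):
--         row.append(item)
--         if len(row) == 2:
--             rows.append(row)
--             row = []
--     if row:
--         rows.append(row)
--     return rows
-- ===== SOURCE B (Python) =====
-- def _menu_two_cols(items):
--     lst = list(items or [])
--     return [lst[i:i + 2] for i in range(0, len(lst), 2)]
-- ===== Notes on version B (the rewrite author's own statement) =====
-- stated objective: idiomatic
-- what changed: Replaces the running two-element row buffer with its length check and trailing-flush branch by a single stride-2 slicing comprehension over index windows.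
import Mathlib
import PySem

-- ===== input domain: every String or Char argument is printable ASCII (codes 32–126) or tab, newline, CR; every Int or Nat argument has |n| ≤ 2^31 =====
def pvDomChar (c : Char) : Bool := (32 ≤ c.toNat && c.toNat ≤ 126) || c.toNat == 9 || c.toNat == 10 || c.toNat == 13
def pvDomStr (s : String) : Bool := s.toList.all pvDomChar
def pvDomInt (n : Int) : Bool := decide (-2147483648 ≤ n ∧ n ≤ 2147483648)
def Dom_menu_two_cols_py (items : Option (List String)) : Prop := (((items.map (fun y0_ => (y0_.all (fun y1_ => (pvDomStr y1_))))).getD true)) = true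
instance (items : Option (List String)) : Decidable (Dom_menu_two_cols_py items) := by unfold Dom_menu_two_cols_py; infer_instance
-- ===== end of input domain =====

-- ===== PORT A =====
-- B replaces A's running row buffer and flush branch by a stride-2 slicing comprehension (idiomatic).
def menu_two_cols_py (items : Option (List String)) : List (List String) :=
  let xs := items.getD []
  let st := xs.foldl
    (fun (s : List (List String) × List String) item =>
      let row := s.2 ++ [item]
      if row.length == 2 then (s.1 ++ [row], []) else (s.1, row))
    ([], [])
  if st.2.isEmpty then st.1 else st.1 ++ [st.2]

-- ===== PORT B =====
def menu_two_cols_py_alt (items : Option (List String)) : List (List String) :=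
  let lst := items.getD []
  (PySem.List.pyRange 0 (lst.length : Int) 2).map
    (fun i => PySem.List.slice lst (some i) (some (i + 2)))

-- ===== PRECONDITION & SPEC =====
def Spec_menu_two_cols_py (items : Option (List String)) (out : List (List String)) : Prop := out = menu_two_cols_py_alt items
instance (items : Option (List String)) (out : List (List String)) : Decidable (Spec_menu_two_cols_py items out) := by unfold Spec_menu_two_cols_py; infer_instance

-- ===== CLAIM (what is proved, stated in full; the proofs are below) =====
def Claim_equal_menu_two_cols_py : Prop := ∀ (items : Option (List String)), Dom_menu_two_cols_py items → Spec_menu_two_cols_py items (menu_two_cols_py items)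

-- ===== LEMMAS AND PROOFS =====

/-- Reference chunking: groups of two, trailing singleton kept. -/
def chunk2 : List String → List (List String)
  | [] => []
  | [a] => [[a]]
  | a :: b :: t => [a, b] :: chunk2 t

theorem lemA (xs : List String) (acc : List (List String)) :
    (let st := xs.foldl
        (fun (s : List (List String) × List String) item =>
          let row := s.2 ++ [item]
          if row.length == 2 then (s.1 ++ [row], []) else (s.1, row))
        (acc, []);
      if st.2.isEmpty then st.1 else st.1 ++ [st.2]) = acc ++ chunk2 xs := by
  induction xs using chunk2.induct generalizing acc with
  | case1 => simp [chunk2]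
  | case2 a => simp [chunk2, List.foldl]
  | case3 a b t ih => simpa [chunk2, List.foldl] using ih (acc ++ [[a, b]])

theorem rangeMap (xs : List String) :
    (List.range ((xs.length + 1) / 2)).map (fun k => (xs.drop (2 * k)).take 2) = chunk2 xs := by
  induction xs using chunk2.induct with
  | case1 => simp [chunk2]
  | case2 a => simp [chunk2]
  | case3 a b t ih =>
      have hm : ((a :: b :: t).length + 1) / 2 = (t.length + 1) / 2 + 1 := by
        simp [List.length]; omega
      rw [hm, List.range_succ_eq_map]
      simp only [List.map_cons, List.map_map]
      refine congrArg₂ _ (by simp) ?_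
      rw [← ih]
      exact List.map_congr_left (fun k _ => by
        simp [Function.comp, Nat.mul_add, List.drop_succ_cons])

theorem lemB (xs : List String) :
    (PySem.List.pyRange 0 (xs.length : Int) 2).map
      (fun i => PySem.List.slice xs (some i) (some (i + 2))) = chunk2 xs := by
  rw [PySem.List.pyRange_of_pos 0 (xs.length : Int) (by norm_num)]
  rw [← rangeMap xs, List.map_map]
  have hlen : (if (0 : Int) < (xs.length : Int) then (((xs.length : Int) - 0 + 2 - 1) / 2).toNat else 0)
      = (xs.length + 1) / 2 := by
    split
    · omega
    · omega
  rw [hlen]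
  refine List.map_congr_left (fun k _ => ?_)
  have h1 : (0 : Int) + 2 * (k : Int) = ((2 * k : Nat) : Int) := by push_cast; ring
  have h2 : ((2 * k : Nat) : Int) + 2 = ((2 * k : Nat) : Int) + ((2 : Nat) : Int) := by norm_num
  simp only [Function.comp, h1, h2, PySem.List.slice_natCast_add]

-- ===== VERDICT (by name: the statement is the Claim_ definition above) =====
theorem menu_two_cols_py_spec : Claim_equal_menu_two_cols_py := by
  intro items _
  unfold Spec_menu_two_cols_py menu_two_cols_py menu_two_cols_py_alt
  rw [lemB (items.getD [])]
  exact lemA (items.getD []) []
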